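-- pv_equiv track=rewrite | github.com/TriangleCommunications/reorder-table-columns | reorder.py | sort_input_columns
-- ===== SOURCE A (Python) =====
-- from typing import List, Tuple, Optional
--
-- def sort_input_columns(
--     columns: List[str]
-- ) -> Tuple[List[str], List[str]]:
--     """Sort passed argument columns into start and end target column lists"""
--     target_start: List[str] = []
--     target_end: List[str] = []
--     end_col = False
--     for col in list(columns):
--         # ... designates seperation from start to end target columns
--         if col == "...":
--             end_col = True
--         elif end_col:
--             target_end.append(col)
--         else:
--             target_start.append(col)
--     return target_start, target_end
-- ===== SOURCE B (Python) =====
-- def sort_input_columns(columns):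
--     """Sort passed argument columns into start and end target column lists"""
--     cols = list(columns)
--     try:
--         idx = cols.index("...")
--     except ValueError:
--         return cols, []
--     return cols[:idx], [c for c in cols[idx + 1:] if c != "..."]
-- ===== Notes on version B (the rewrite author's own statement) =====
-- stated objective: simpler
-- what changed: Replaces the stateful flag-driven single-pass loop with finding the first separator index and slicing: head slice before it, filtered tail slice after it.
import Mathlib
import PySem

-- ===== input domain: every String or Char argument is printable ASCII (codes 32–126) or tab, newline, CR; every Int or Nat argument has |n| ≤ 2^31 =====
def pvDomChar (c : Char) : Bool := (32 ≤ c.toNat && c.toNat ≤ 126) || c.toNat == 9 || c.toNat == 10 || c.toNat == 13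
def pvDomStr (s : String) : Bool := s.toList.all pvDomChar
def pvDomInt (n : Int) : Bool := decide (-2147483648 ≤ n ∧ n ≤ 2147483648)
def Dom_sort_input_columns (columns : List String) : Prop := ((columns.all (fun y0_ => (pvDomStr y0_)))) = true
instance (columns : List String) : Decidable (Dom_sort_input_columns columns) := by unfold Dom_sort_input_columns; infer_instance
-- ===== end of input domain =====

-- ===== PORT A =====
-- B replaces the flag-driven single-pass loop by an index-plus-slice decomposition (objective: simpler).
-- A-side helper: the loop body of A's for-loop (state = (target_start, target_end, end_col))
def pvStepA (s : List String × List String × Bool) (col : String) : List String × List String × Bool :=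
  if col == "..." then (s.1, s.2.1, true)
  else if s.2.2 then (s.1, s.2.1 ++ [col], s.2.2)
  else (s.1 ++ [col], s.2.1, s.2.2)

def sort_input_columns (columns : List String) : List String × List String :=
  let st := columns.foldl pvStepA ([], [], false)
  (st.1, st.2.1)

-- ===== PORT B =====
def sort_input_columns_alt (columns : List String) : List String × List String :=
  match PySem.List.index? columns "..." with
  | none => (columns, [])
  | some idx =>
      (PySem.List.slice columns none (some (idx : Int)),
       (PySem.List.slice columns (some ((idx : Int) + 1)) none).filter (fun c => c != "..."))

-- ===== PRECONDITION & SPEC =====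
def Spec_sort_input_columns (columns : List String) (out : List String × List String) : Prop := out = sort_input_columns_alt columns
instance (columns : List String) (out : List String × List String) : Decidable (Spec_sort_input_columns columns out) := by unfold Spec_sort_input_columns; infer_instance

-- ===== CLAIM (what is proved, stated in full; the proofs are below) =====
def Claim_equal_sort_input_columns : Prop := ∀ (columns : List String), Dom_sort_input_columns columns → Spec_sort_input_columns columns (sort_input_columns columns)

-- ===== LEMMAS AND PROOFS =====

theorem foldl_stepA_true (l : List String) (a b : List String) :
    l.foldl pvStepA (a, b, true) = (a, b ++ l.filter (fun c => c != "..."), true) := by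
  induction l generalizing b with
  | nil => simp
  | cons x t ih =>
    by_cases hx : x = "..."
    · subst hx; simp [pvStepA, ih]
    · simp [pvStepA, hx, ih]

theorem alt_cons_sep (l : List String) :
    sort_input_columns_alt ("..." :: l) = ([], l.filter (fun c => c != "...")) := by
  rw [sort_input_columns_alt, PySem.List.index?_cons_self]
  dsimp only
  rw [PySem.List.slice_to _ (by norm_num), PySem.List.slice_from _ (by norm_num)]
  norm_num

theorem alt_cons_ne (x : String) (l : List String) (hx : x ≠ "...") :
    sort_input_columns_alt (x :: l) =
      (x :: (sort_input_columns_alt l).1, (sort_input_columns_alt l).2) := by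
  rw [sort_input_columns_alt, sort_input_columns_alt, PySem.List.index?_cons_of_ne l hx]
  cases h : PySem.List.index? l "..." with
  | none => simp
  | some k =>
    simp only [Option.map_some]
    rw [PySem.List.slice_to _ (by positivity), PySem.List.slice_to _ (by positivity),
        PySem.List.slice_from _ (by positivity), PySem.List.slice_from _ (by positivity)]
    have e1 : ((((k+1 : Nat)) : Int)).toNat = k+1 := by simp
    have e2 : (((((k+1 : Nat)) : Int))+1).toNat = k+2 := by omega
    have e3 : ((((k : Nat) : Int))+1).toNat = k+1 := by omega
    have e4 : (((k : Nat) : Int)).toNat = k := by simp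
    rw [e1, e2, e3, e4]
    simp

theorem foldl_stepA_false (l : List String) (a : List String) :
    l.foldl pvStepA (a, [], false) =
      (a ++ (sort_input_columns_alt l).1, (sort_input_columns_alt l).2, decide ("..." ∈ l)) := by
  induction l generalizing a with
  | nil =>
    rw [show sort_input_columns_alt [] = ([], []) from rfl]
    simp
  | cons x t ih =>
    rw [List.foldl_cons]
    by_cases hx : x = "..."
    · subst hx
      rw [show pvStepA (a, [], false) "..." = (a, [], true) from by simp [pvStepA]]
      rw [foldl_stepA_true, alt_cons_sep]
      simp
    · rw [show pvStepA (a, [], false) x = (a ++ [x], [], false) from by simp [pvStepA, hx]]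
      rw [ih (a ++ [x]), alt_cons_ne x t hx]
      simp [Ne.symm hx]

-- ===== VERDICT (by name: the statement is the Claim_ definition above) =====
theorem sort_input_columns_spec : Claim_equal_sort_input_columns := by
  intro columns _
  unfold Spec_sort_input_columns sort_input_columns
  rw [foldl_stepA_false columns []]
  simp
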